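-- pv_equiv track=rewrite | github.com/manz/ff4 | utils/smallvwf.py | text_to_char
-- ===== SOURCE A (Python) =====
-- def text_to_char(text):
--     data = []
--     for char in text:
--         if 'A' <= char <= 'Z':
--             data.append(ord(char) - ord('A') + 0x42)
--         elif 'a' <= char <= 'z':
--             data.append(ord(char) - ord('a') + 0x42 + ord('Z') - ord('A') + 1)
--         elif char == ' ':
--             data.append(0xFF)
--     return data
-- ===== SOURCE B (Python) =====
-- SRC = 'ABCDEFGHIJKLMNOPQRSTUVWXYZabcdefghijklmnopqrstuvwxyz '
-- DST = ''.join(chr(0x42 + i) for i in range(52)) + '\xff'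
-- _TR = str.maketrans(SRC, DST)
--
-- def text_to_char(text):
--     kept = ''.join(c for c in text if c in SRC)
--     return [ord(x) for x in kept.translate(_TR)]
-- ===== Notes on version B (the rewrite author's own statement) =====
-- stated objective: idiomatic
-- what changed: B is a staged pipeline with no per-character arithmetic or branches: it filters the string by membership in a constant alphabet string, bulk-converts the kept characters with str.maketrans/str.translate (codes paired positionally with the alphabet), and reads the codes back with ord.
import Mathlib
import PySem

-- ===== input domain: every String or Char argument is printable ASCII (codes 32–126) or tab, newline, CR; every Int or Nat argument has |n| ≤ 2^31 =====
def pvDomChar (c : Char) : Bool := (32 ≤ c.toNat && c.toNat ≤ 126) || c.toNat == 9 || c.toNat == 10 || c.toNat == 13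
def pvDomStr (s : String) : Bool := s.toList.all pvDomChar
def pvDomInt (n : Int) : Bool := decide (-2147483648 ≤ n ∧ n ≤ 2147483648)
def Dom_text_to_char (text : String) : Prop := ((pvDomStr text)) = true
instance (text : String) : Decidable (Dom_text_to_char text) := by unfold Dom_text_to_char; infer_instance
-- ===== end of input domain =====

-- B replaces A's per-character range-comparison branches by a staged pipeline: filter by membership in a constant alphabet string, bulk-translate the kept characters via a positional maketrans pairing, read codes back with ord (objective: idiomatic; same asymptotic cost).

-- ===== PORT A =====
-- loop `for char in text: if …: data.append(…)` as a foldl over the characters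
def text_to_char (text : String) : List Int :=
  text.toList.foldl
    (fun data char =>
      if 'A' ≤ char ∧ char ≤ 'Z' then data ++ [(char.toNat : Int) - 65 + 0x42]
      else if 'a' ≤ char ∧ char ≤ 'z' then data ++ [(char.toNat : Int) - 97 + 0x42 + 90 - 65 + 1]
      else if char = ' ' then data ++ [0xFF]
      else data)
    []

-- ===== PORT B =====
-- SRC = 'A…Za…z ' (module constant of Source B)
def pvSRC : List Char := "ABCDEFGHIJKLMNOPQRSTUVWXYZabcdefghijklmnopqrstuvwxyz ".toList
-- DST = ''.join(chr(0x42 + i) for i in range(52)) + '\xff'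
def pvDST : List Char :=
  ((PySem.List.pyRange 0 52 1).map (fun i => Char.ofNat (0x42 + i).toNat)) ++ [Char.ofNat 0xFF]
-- _TR = str.maketrans(SRC, DST): ported by hand as the positional pairing of the two strings
-- (exact: maketrans of two equal-length strings maps the i-th char of SRC to the i-th char of DST)
def pvTR : PySem.Dict Char Char := PySem.Dict.mk (pvSRC.zip pvDST)

-- kept = ''.join(c for c in text if c in SRC); return [ord(x) for x in kept.translate(_TR)]
-- (translate ported by hand: each char is replaced by its table entry, kept unchanged if absent — exact for a char→char table)
def text_to_char_alt (text : String) : List Int :=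
  let kept := text.toList.filter (fun c => pvSRC.contains c)
  (kept.map (fun c => (pvTR.get? c).getD c)).map (fun x => (x.toNat : Int))

-- ===== PRECONDITION & SPEC =====
def Spec_text_to_char (text : String) (out : List Int) : Prop := out = text_to_char_alt text
instance (text : String) (out : List Int) : Decidable (Spec_text_to_char text out) := by unfold Spec_text_to_char; infer_instance

-- ===== CLAIM (what is proved, stated in full; the proofs are below) =====
def Claim_equal_text_to_char : Prop := ∀ (text : String), Dom_text_to_char text → Spec_text_to_char text (text_to_char text)

-- ===== LEMMAS AND PROOFS =====

-- what A appends for one character, as a (possibly empty) chunk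
def pvStepA (c : Char) : List Int :=
  if 'A' ≤ c ∧ c ≤ 'Z' then [(c.toNat : Int) - 65 + 0x42]
  else if 'a' ≤ c ∧ c ≤ 'z' then [(c.toNat : Int) - 97 + 0x42 + 90 - 65 + 1]
  else if c = ' ' then [0xFF]
  else []

-- what B produces for one character
def pvStepB (c : Char) : List Int :=
  if pvSRC.contains c then [(((pvTR.get? c).getD c).toNat : Int)] else []

set_option maxRecDepth 20000 in
theorem pvStep_eq (c : Char) (hc : pvDomChar c = true) : pvStepA c = pvStepB c := by
  have h126 : c.toNat ≤ 126 := by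
    simp only [pvDomChar, Bool.or_eq_true, Bool.and_eq_true, decide_eq_true_eq,
      beq_iff_eq] at hc
    omega
  have he : c = Char.ofNat c.toNat := (Char.ofNat_toNat c).symm
  rw [he]
  interval_cases h : c.toNat <;> decide

theorem pvBody_eq (data : List Int) (c : Char) :
    (if 'A' ≤ c ∧ c ≤ 'Z' then data ++ [(c.toNat : Int) - 65 + 0x42]
      else if 'a' ≤ c ∧ c ≤ 'z' then data ++ [(c.toNat : Int) - 97 + 0x42 + 90 - 65 + 1]
      else if c = ' ' then data ++ [0xFF]
      else data) = data ++ pvStepA c := by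
  simp only [pvStepA]
  split_ifs <;> simp

theorem pvPipe_cons (c : Char) (l : List Char) :
    (((c :: l).filter (fun c => pvSRC.contains c)).map
        (fun c => (pvTR.get? c).getD c)).map (fun x => (x.toNat : Int))
    = pvStepB c ++ ((l.filter (fun c => pvSRC.contains c)).map
        (fun c => (pvTR.get? c).getD c)).map (fun x => (x.toNat : Int)) := by
  simp only [List.filter_cons, pvStepB]
  by_cases h : pvSRC.contains c
  · simp only [h, if_pos, List.map_cons, List.singleton_append]
  · simp only [h, Bool.false_eq_true, if_neg, not_false_iff, List.nil_append]

theorem pvFoldl_eq (l : List Char) (hl : ∀ c ∈ l, pvDomChar c = true) (acc : List Int) :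
    l.foldl
      (fun data char =>
        if 'A' ≤ char ∧ char ≤ 'Z' then data ++ [(char.toNat : Int) - 65 + 0x42]
        else if 'a' ≤ char ∧ char ≤ 'z' then data ++ [(char.toNat : Int) - 97 + 0x42 + 90 - 65 + 1]
        else if char = ' ' then data ++ [0xFF]
        else data)
      acc
    = acc ++ ((l.filter (fun c => pvSRC.contains c)).map
        (fun c => (pvTR.get? c).getD c)).map (fun x => (x.toNat : Int)) := by
  induction l generalizing acc with
  | nil => simp
  | cons c l ih =>
    have hc := pvStep_eq c (hl c (List.mem_cons_self ..))
    have hl' : ∀ x ∈ l, pvDomChar x = true := fun x hx => hl x (List.mem_cons_of_mem _ hx)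
    rw [List.foldl_cons, pvBody_eq, pvPipe_cons, hc, ih hl', List.append_assoc]

-- ===== VERDICT (by name: the statement is the Claim_ definition above) =====
theorem text_to_char_spec : Claim_equal_text_to_char := by
  intro text hdom
  unfold Spec_text_to_char text_to_char text_to_char_alt
  have hl : ∀ c ∈ text.toList, pvDomChar c = true := by
    simpa [Dom_text_to_char, pvDomStr, List.all_eq_true] using hdom
  simpa using pvFoldl_eq text.toList hl []
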